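-- pv_equiv track=rewrite | github.com/y7y1h13/Algo_Study | beakjun/83일차/신고 결과 받기.py | solution
-- ===== SOURCE A (Python) =====
-- def solution(id_list, report, k):
--     answer = []
--     report = list(set(report))
--     res = {}
--
--     for i in id_list:
--         if i not in res:
--             res[i] = [0]
--
--     for j in range(len(report)):
--         n = report[j].split()
--         res[n[0]].append(n[1])
--         res[n[1]][0] += 1
--
--     for i in res:
--         tmp = 0
--         for j in res[i][1:]:
--             if res[j][0] >= k:
--                 tmp += 1
--         answer.append(tmp)
--         tmp = 0
--     return answer
-- ===== SOURCE B (Python) =====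
-- def solution(id_list, report, k):
--     pairs = [(n[0], n[1]) for n in (r.split() for r in set(report))]
--     targets = [t for _, t in pairs]
--     banned = {t for t in targets if targets.count(t) >= k}
--     return [sum(1 for a, b in pairs if a == i and b in banned)
--             for i in dict.fromkeys(id_list)]
-- ===== Notes on version B (the rewrite author's own statement) =====
-- stated objective: alternative
-- what changed: B keeps no dict state at all: it precomputes the banned set by counting each target directly in the flat target list (targets.count), then answers each id with a direct count comprehension over the deduped pairs, instead of A's per-reporter stored target lists consumed by a final nested loop over dict entries.
import Mathlib
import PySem

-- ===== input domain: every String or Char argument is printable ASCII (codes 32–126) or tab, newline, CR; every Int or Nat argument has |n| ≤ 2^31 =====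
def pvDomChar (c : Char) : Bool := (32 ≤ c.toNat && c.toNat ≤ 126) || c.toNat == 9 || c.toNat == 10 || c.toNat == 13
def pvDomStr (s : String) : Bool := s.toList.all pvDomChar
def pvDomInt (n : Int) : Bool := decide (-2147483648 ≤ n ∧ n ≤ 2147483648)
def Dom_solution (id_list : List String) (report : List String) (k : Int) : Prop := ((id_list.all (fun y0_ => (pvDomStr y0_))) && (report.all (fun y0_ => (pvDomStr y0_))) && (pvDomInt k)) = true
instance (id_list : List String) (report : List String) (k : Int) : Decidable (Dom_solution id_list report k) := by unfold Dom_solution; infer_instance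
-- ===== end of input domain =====

-- B keeps no dict state at all: it builds the banned set by counting each target directly in the
-- flat target list and answers each deduped id with one counting comprehension over the deduped
-- pairs; alternative decomposition, same return value.
-- ===== PORT A =====
-- res[i] is Python's list [count, t1, t2, ...]: ported as the pair (count, targets), exact under Pre_.
def solution (id_list : List String) (report : List String) (k : Int) : List Int :=
  let answer : List Int := []
  let report := PySem.Set.ofList report          -- report = list(set(report)); answer is set-order independent
  let res : PySem.Dict String (Int × List String) := PySem.Dict.empty
  let res := id_list.foldl (fun res i =>
      if res.contains i then res else res.insert i (0, ([] : List String))) res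
  let res := (PySem.List.pyRange 0 (PySem.List.len report) 1).foldl (fun res j =>
      let n := PySem.Str.split₀ (PySem.List.pyGetD report j "")
      let a := PySem.List.pyGetD n 0 ""           -- n[0]; IndexError (excluded by Pre_) gives the default
      let b := PySem.List.pyGetD n 1 ""
      let pa := res.getD a (0, [])                -- KeyError (excluded by Pre_) gives the default
      let res := res.insert a (pa.1, pa.2 ++ [b])
      let pb := res.getD b (0, [])
      res.insert b (pb.1 + 1, pb.2)) res
  res.items.foldl (fun answer iv =>
      let tmp := iv.2.2.foldl (fun tmp j =>
          if (res.getD j (0, [])).1 ≥ k then tmp + 1 else tmp) (0 : Int)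
      answer ++ [tmp]) answer

-- ===== PORT B =====
def solution_alt (id_list : List String) (report : List String) (k : Int) : List Int :=
  let pairs := (PySem.Set.ofList report).map (fun r =>
      let n := PySem.Str.split₀ r
      (PySem.List.pyGetD n 0 "", PySem.List.pyGetD n 1 ""))
  let targets := pairs.map (fun p => p.2)
  let banned := PySem.Set.ofList (targets.filter (fun t => decide (k ≤ (targets.count t : Int))))
  (PySem.List.dedup id_list).map (fun i =>
      ((pairs.countP (fun p => decide (p.1 = i) && banned.contains p.2)) : Int))

-- ===== PRECONDITION & SPEC =====
-- Pre_ excludes exactly the inputs on which A raises: a report whose split has fewer than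
-- two tokens (IndexError) or whose reporter/target token is not in id_list (KeyError).
def Pre_solution (id_list : List String) (report : List String) (k : Int) : Prop :=
  ∀ r ∈ report, 2 ≤ (PySem.Str.split₀ r).length ∧
    PySem.List.pyGetD (PySem.Str.split₀ r) 0 "" ∈ id_list ∧
    PySem.List.pyGetD (PySem.Str.split₀ r) 1 "" ∈ id_list
instance (id_list : List String) (report : List String) (k : Int) : Decidable (Pre_solution id_list report k) := by unfold Pre_solution; infer_instance
def pvWitness_solution : List String × List String × Int := (["muzi", "frodo"], ["muzi frodo", "frodo muzi"], 1)

def Spec_solution (id_list : List String) (report : List String) (k : Int) (out : List Int) : Prop := out = solution_alt id_list report k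
instance (id_list : List String) (report : List String) (k : Int) (out : List Int) : Decidable (Spec_solution id_list report k out) := by unfold Spec_solution; infer_instance

-- ===== CLAIM (what is proved, stated in full; the proofs are below) =====
def Claim_equal_solution : Prop := ∀ (id_list : List String) (report : List String) (k : Int), Dom_solution id_list report k → Pre_solution id_list report k → Spec_solution id_list report k (solution id_list report k)

-- ===== LEMMAS AND PROOFS =====

-- tokens of one report string: n[0] and n[1] of r.split()
def pvTok0 (r : String) : String := PySem.List.pyGetD (PySem.Str.split₀ r) 0 ""
def pvTok1 (r : String) : String := PySem.List.pyGetD (PySem.Str.split₀ r) 1 ""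

-- a dict whose items tabulate f over the (nodup-free) key list m
def pvTab {ν : Type} (m : List String) (f : String → ν) : PySem.Dict String ν :=
  PySem.Dict.mk (m.map (fun i => (i, f i)))

-- A's loop-2 step (the two reads and two inserts, in Python's order)
def pvStepA (res : PySem.Dict String (Int × List String)) (r : String) :
    PySem.Dict String (Int × List String) :=
  let a := pvTok0 r
  let b := pvTok1 r
  let pa := res.getD a (0, [])
  let res := res.insert a (pa.1, pa.2 ++ [b])
  let pb := res.getD b (0, [])
  res.insert b (pb.1 + 1, pb.2)

-- A's loop-3, as a function of the finished res
def pvFinalA (k : Int) (res : PySem.Dict String (Int × List String)) : List Int :=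
  res.items.foldl (fun answer iv =>
      answer ++ [iv.2.2.foldl (fun tmp j =>
          if (res.getD j (0, [])).1 ≥ k then tmp + 1 else tmp) (0 : Int)]) []

-- the common closed form both programs compute
def pvCnt (rp : List String) (t : String) : Int := (((PySem.Set.ofList rp).map pvTok1).count t : Int)
def pvSpec (il rp : List String) (k : Int) : List Int :=
  (PySem.Set.ofList il).map (fun i =>
    (((PySem.Set.ofList rp).countP
        (fun r => decide (pvTok0 r = i) && decide (k ≤ pvCnt rp (pvTok1 r)))) : Int))

theorem pvTab_congr {ν : Type} (m : List String) (g1 g2 : String → ν)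
    (h : ∀ i ∈ m, g1 i = g2 i) : pvTab m g1 = pvTab m g2 := by
  unfold pvTab
  congr 1
  apply List.map_congr_left
  intro i hi
  rw [h i hi]

theorem pvTab_contains {ν : Type} (m : List String) (f : String → ν) (x : String) :
    (pvTab m f).contains x = decide (x ∈ m) := by
  induction m with
  | nil => simp [pvTab, PySem.Dict.contains]
  | cons a m ih =>
    simp only [pvTab, PySem.Dict.contains] at ih ⊢
    by_cases h : a = x
    · simp [h]
    · have h' : ¬ x = a := fun hh => h hh.symm
      simp only [List.map_cons, List.any_cons, ih]
      simp [h, h']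

theorem pvTab_getD {ν : Type} (m : List String) (f : String → ν) (x : String) (d : ν)
    (hx : x ∈ m) : (pvTab m f).getD x d = f x := by
  induction m with
  | nil => simp at hx
  | cons a m ih =>
    by_cases h : a = x
    · simp [pvTab, PySem.Dict.getD, PySem.Dict.get?, h]
    · have hx' : x ∈ m := by
        rcases List.mem_cons.mp hx with h' | h'
        · exact absurd h'.symm h
        · exact h'
      simpa [pvTab, PySem.Dict.getD, PySem.Dict.get?, List.find?, h] using ih hx'

theorem pvTab_insert_mem {ν : Type} (m : List String) (f : String → ν) (x : String) (v : ν)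
    (hx : x ∈ m) : (pvTab m f).insert x v = pvTab m (fun i => if i = x then v else f i) := by
  simp only [PySem.Dict.insert, pvTab_contains, hx, decide_true, if_true]
  unfold pvTab
  congr 1
  simp only [List.map_map]
  apply List.map_congr_left
  intro i _
  by_cases h : i = x <;> simp [h, Function.comp]

theorem pvTab_insert_not_mem {ν : Type} (m : List String) (f : String → ν) (x : String) (v : ν)
    (hx : x ∉ m) :
    (pvTab m f).insert x v = pvTab (m ++ [x]) (fun i => if i = x then v else f i) := by
  simp only [PySem.Dict.insert, pvTab_contains, hx, decide_false, Bool.false_eq_true, if_false]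
  unfold pvTab
  congr 1
  simp only [List.map_append, List.map_singleton]
  congr 1
  apply List.map_congr_left
  intro i hi
  have hix : i ≠ x := fun h => hx (h ▸ hi)
  simp [hix]

-- A's loop 1: dict.setdefault-style initialisation = tabulated (0, []) over Set.update m xs
theorem pvInitA (xs : List String) : ∀ (m : List String),
    xs.foldl (fun d i => if d.contains i then d else d.insert i ((0 : Int), ([] : List String)))
      (pvTab m (fun _ => (0, []))) =
    pvTab (PySem.Set.update m xs) (fun _ => (0, [])) := by
  induction xs with
  | nil => intro m; rfl
  | cons x xs ih =>
    intro m
    simp only [List.foldl_cons, PySem.Set.update, pvTab_contains]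
    by_cases hx : x ∈ m
    · have hadd : PySem.Set.add m x = m := by
        simp [PySem.Set.add, PySem.Set.contains, hx]
      simp only [hx, decide_true, if_true]
      simpa [PySem.Set.update, hadd] using ih m
    · have hadd : PySem.Set.add m x = m ++ [x] := by
        simp [PySem.Set.add, PySem.Set.contains, hx]
      simp only [hx, decide_false, Bool.false_eq_true, if_false]
      rw [pvTab_insert_not_mem m _ x _ hx]
      have hconst : (fun i => if i = x then ((0 : Int), ([] : List String)) else (0, [])) =
          (fun _ => ((0 : Int), ([] : List String))) := by
        funext i; split <;> rfl
      rw [hconst]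
      simpa [PySem.Set.update, hadd] using ih (m ++ [x])

-- A's loop 2 over the deduped reports, characterised per id
theorem pvPassA (l : List String) :
    ∀ (m : List String) (f : String → Int × List String),
    (∀ r ∈ l, pvTok0 r ∈ m ∧ pvTok1 r ∈ m) →
    l.foldl pvStepA (pvTab m f) =
    pvTab m (fun i =>
      ((f i).1 + ((l.map pvTok1).count i : Int),
       (f i).2 ++ (l.filter (fun r => decide (pvTok0 r = i))).map pvTok1)) := by
  induction l with
  | nil =>
    intro m f _
    simp only [List.foldl_nil, List.map_nil, List.filter_nil]
    exact pvTab_congr m _ _ (by intro i _; simp)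
  | cons r l ih =>
    intro m f hl
    have ha : pvTok0 r ∈ m := (hl r (List.mem_cons_self)).1
    have hb : pvTok1 r ∈ m := (hl r (List.mem_cons_self)).2
    have hl' : ∀ q ∈ l, pvTok0 q ∈ m ∧ pvTok1 q ∈ m := fun q hq => hl q (List.mem_cons_of_mem r hq)
    simp only [List.foldl_cons]
    show l.foldl pvStepA (pvStepA (pvTab m f) r) = _
    simp only [pvStepA]
    rw [pvTab_getD m f (pvTok0 r) _ ha, pvTab_insert_mem m f (pvTok0 r) _ ha,
      pvTab_getD m _ (pvTok1 r) _ hb, pvTab_insert_mem m _ (pvTok1 r) _ hb, ih m _ hl']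
    apply pvTab_congr
    intro i _
    by_cases hba : pvTok1 r = pvTok0 r <;> by_cases hia : pvTok0 r = i <;> by_cases hib : pvTok1 r = i <;>
      simp_all [List.filter_cons, Prod.mk.injEq, eq_comm] <;> omega

-- re-phrasing of Pre_ through the token helpers, lifted to the deduped reports
theorem pvPre_toks (il rp : List String)
    (hpre : Pre_solution il rp 0) :
    ∀ r ∈ PySem.Set.ofList rp, pvTok0 r ∈ PySem.Set.ofList il ∧ pvTok1 r ∈ PySem.Set.ofList il := by
  intro r hr
  have hr' : r ∈ rp := (PySem.Set.mem_ofList rp r).mp hr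
  have h := hpre r hr'
  exact ⟨(PySem.Set.mem_ofList il _).mpr h.2.1, (PySem.Set.mem_ofList il _).mpr h.2.2⟩

-- the inner counting loop of A's loop 3 is a countP
theorem pvCountLoop (k : Int) (d : PySem.Dict String (Int × List String)) (ts : List String) :
    ts.foldl (fun tmp j => if (d.getD j (0, [])).1 ≥ k then tmp + 1 else tmp) (0 : Int) =
    ((ts.countP (fun j => decide ((d.getD j (0, [])).1 ≥ k))) : Int) := by
  have h := PySem.List.foldl_ite_add_one (fun j => (d.getD j (0, [])).1 ≥ k) ts 0
  rw [h, zero_add]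

-- A's loop 3 over a tabulated dict is a map over the key list
theorem pvFinalA_char (k : Int) (m : List String) (f : String → Int × List String) :
    pvFinalA k (pvTab m f) =
    m.map (fun i => (f i).2.foldl (fun tmp j =>
        if ((pvTab m f).getD j (0, [])).1 ≥ k then tmp + 1 else tmp) (0 : Int)) := by
  unfold pvFinalA
  rw [PySem.List.foldl_append_singleton_eq_map]
  rw [List.nil_append]
  have hitems : (pvTab m f).items = m.map (fun i => (i, f i)) := rfl
  rw [hitems, List.map_map]
  rfl

-- A equals the common closed form
theorem pvA_eq (il rp : List String) (k : Int)
    (htok : ∀ r ∈ PySem.Set.ofList rp, pvTok0 r ∈ PySem.Set.ofList il ∧ pvTok1 r ∈ PySem.Set.ofList il) :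
    solution il rp k = pvSpec il rp k := by
  have hres :
      ((PySem.List.pyRange 0 (PySem.List.len (PySem.Set.ofList rp)) 1).foldl
        (fun res j => pvStepA res (PySem.List.pyGetD (PySem.Set.ofList rp) j ""))
        (il.foldl (fun d i => if d.contains i then d
            else d.insert i ((0 : Int), ([] : List String))) PySem.Dict.empty)) =
      pvTab (PySem.Set.ofList il) (fun i =>
        (((0 : Int) + (((PySem.Set.ofList rp).map pvTok1).count i : Int)),
         ([] : List String) ++
           (((PySem.Set.ofList rp).filter (fun r => decide (pvTok0 r = i))).map pvTok1))) := by
    calc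
      _ = (PySem.Set.ofList rp).foldl pvStepA
            (il.foldl (fun d i => if d.contains i then d
              else d.insert i ((0 : Int), ([] : List String))) PySem.Dict.empty) :=
        PySem.List.foldl_pyRange_zero_pyGetD (PySem.Set.ofList rp) "" pvStepA _
      _ = (PySem.Set.ofList rp).foldl pvStepA
            (pvTab (PySem.Set.ofList il) (fun _ => ((0 : Int), ([] : List String)))) := by
        exact congrArg (fun d => List.foldl pvStepA d (PySem.Set.ofList rp)) (pvInitA il [])
      _ = _ := pvPassA (PySem.Set.ofList rp) (PySem.Set.ofList il) _ htok
  calc solution il rp k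
      = pvFinalA k (pvTab (PySem.Set.ofList il) (fun i =>
          (((0 : Int) + (((PySem.Set.ofList rp).map pvTok1).count i : Int)),
           ([] : List String) ++
             (((PySem.Set.ofList rp).filter (fun r => decide (pvTok0 r = i))).map pvTok1)))) :=
        congrArg (pvFinalA k) hres
    _ = pvSpec il rp k := by
        rw [pvFinalA_char]
        unfold pvSpec
        apply List.map_congr_left
        intro i hi
        rw [pvCountLoop]
        simp only [List.nil_append]
        rw [List.countP_map, List.countP_filter]
        refine congrArg Nat.cast (List.countP_congr ?_)
        intro r hr
        dsimp only [Function.comp]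
        have hg := pvTab_getD (PySem.Set.ofList il)
          (fun i => ((0 : Int) + (((PySem.Set.ofList rp).map pvTok1).count i : Int),
            ((PySem.Set.ofList rp).filter (fun r => decide (pvTok0 r = i))).map pvTok1))
          (pvTok1 r) ((0 : Int), ([] : List String)) (htok r hr).2
        simp only [Bool.and_eq_true, decide_eq_true_eq]
        rw [hg]
        simp [pvCnt, and_comm, ge_iff_le]

-- B equals the common closed form
theorem pvB_eq (il rp : List String) (k : Int) :
    solution_alt il rp k = pvSpec il rp k := by
  simp only [solution_alt]
  rw [show (fun r => (PySem.List.pyGetD (PySem.Str.split₀ r) 0 "", PySem.List.pyGetD (PySem.Str.split₀ r) 1 "")) =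
        (fun r => (pvTok0 r, pvTok1 r)) from rfl]
  rw [PySem.List.dedup_eq_ofList]
  unfold pvSpec
  apply List.map_congr_left
  intro i hi
  rw [List.countP_map]
  refine congrArg Nat.cast (List.countP_congr ?_)
  intro r hr
  dsimp only [Function.comp]
  have htgt : ((PySem.Set.ofList rp).map (fun r => (pvTok0 r, pvTok1 r))).map (fun p => p.2) =
      (PySem.Set.ofList rp).map pvTok1 := by
    rw [List.map_map]; rfl
  rw [htgt]
  -- banned membership reduces to the count condition, since pvTok1 r occurs in the target list
  have hmem : pvTok1 r ∈ (PySem.Set.ofList rp).map pvTok1 := List.mem_map_of_mem hr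
  by_cases hc : k ≤ pvCnt rp (pvTok1 r)
  · have hfil : pvTok1 r ∈ ((PySem.Set.ofList rp).map pvTok1).filter
        (fun t => decide (k ≤ (((PySem.Set.ofList rp).map pvTok1).count t : Int))) := by
      rw [List.mem_filter]
      exact ⟨hmem, by simpa [pvCnt] using hc⟩
    have hmem' : pvTok1 r ∈ PySem.Set.ofList (((PySem.Set.ofList rp).map pvTok1).filter
        (fun t => decide (k ≤ (((PySem.Set.ofList rp).map pvTok1).count t : Int)))) :=
      (PySem.Set.mem_ofList _ _).mpr hfil
    simp [PySem.Set.contains, hmem', hc]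
  · have hfil : pvTok1 r ∉ ((PySem.Set.ofList rp).map pvTok1).filter
        (fun t => decide (k ≤ (((PySem.Set.ofList rp).map pvTok1).count t : Int))) := by
      rw [List.mem_filter]
      intro h
      exact hc (by simpa [pvCnt] using h.2)
    have hmem' : pvTok1 r ∉ PySem.Set.ofList (((PySem.Set.ofList rp).map pvTok1).filter
        (fun t => decide (k ≤ (((PySem.Set.ofList rp).map pvTok1).count t : Int)))) :=
      fun h => hfil ((PySem.Set.mem_ofList _ _).mp h)
    simp [PySem.Set.contains, hmem', hc]

-- ===== VERDICT (by name: the statement is the Claim_ definition above) =====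
theorem solution_spec : Claim_equal_solution := by
  intro il rp k _hdom hpre
  unfold Spec_solution
  have htok := pvPre_toks il rp (by
    intro r hr
    exact hpre r hr)
  rw [pvA_eq il rp k htok, pvB_eq il rp k]
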